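-- pv_equiv track=rewrite | github.com/danydoerr/PSyCHO | scripts/psycho.py | getCharEnvJ
-- ===== SOURCE A (Python) =====
-- def getCharEnvJ(pos2, My, i, j, p, stop_at_left_bound=None):
--
--     k = p
--     l = p+1
--
--     cj = i-1
--     DELAYED = set()
--
--     left_bound = max(stop_at_left_bound or 0, 0)
--     while k >= left_bound and My[k] < len(pos2[k]) and pos2[k][-1] >= i and \
--             pos2[k][My[k]]<= j:
--         x = My[k]
--         while x < len(pos2[k]) and pos2[k][x] <= j:
--             if pos2[k][x] > cj:
--                 DELAYED.add(pos2[k][x])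
--             x += 1
--         while cj + 1 in DELAYED:
--             DELAYED.remove(cj+1)
--             cj += 1
--
--         while l < len(pos2) and My[l] < len(pos2[l]) and pos2[l][-1] >= i and \
--                 pos2[l][My[l]]<= j:
--             x = My[l]
--             while x < len(pos2[l]) and pos2[l][x] <= j:
--                 if pos2[l][x] > cj:
--                     DELAYED.add(pos2[l][x])
--                 x += 1
--             while cj + 1 in DELAYED:
--                 DELAYED.remove(cj+1)
--                 cj += 1
--             l += 1
--         k -= 1
--     return cj
-- ===== SOURCE B (Python) =====
-- def getCharEnvJ(pos2, My, i, j, p, stop_at_left_bound=None):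
--     # Range-based rewrite: first compute the boundaries of the contiguous block of
--     # rows the sweep reaches (lo+1 .. hi-1), then collect the in-window values of
--     # those rows in one flat pass, and finally read off the consecutive extent by
--     # walking the sorted values once.  Correct because A's continuation conditions
--     # are pure (never depend on cj or the collected set), so the rows A visits are
--     # exactly the maximal admissible run below p plus, if that run is non-empty,
--     # the maximal admissible run above p.
--
--     lb = max(stop_at_left_bound or 0, 0)
--
--     def admits(r):
--         row = pos2[r]
--         m = My[r]
--         return m < len(row) and row[-1] >= i and row[m] <= j
--
--     lo = p
--     while lo >= lb and admits(lo):
--         lo -= 1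
--
--     if lo < p:
--         hi = p + 1
--         while hi < len(pos2) and admits(hi):
--             hi += 1
--     else:
--         hi = p + 1
--
--     vals = set()
--     for r in range(lo + 1, hi):
--         row = pos2[r]
--         x = My[r]
--         while x < len(row) and row[x] <= j:
--             vals.add(row[x])
--             x += 1
--
--     cj = i - 1
--     for v in sorted(vals):
--         if v == cj + 1:
--             cj += 1
--         elif v > cj + 1:
--             break
--     return cj
-- ===== Notes on version B (the rewrite author's own statement) =====
-- stated objective: alternative
-- what changed: B replaces A's interleaved nested k/l sweep with DELAYED add/remove/extend bookkeeping by three staged passes: two boundary scans that only delimit the contiguous block of visited rows, one flat collection pass over that row range, and a single walk over the sorted collected values that reads off the consecutive extent.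
import Mathlib
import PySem

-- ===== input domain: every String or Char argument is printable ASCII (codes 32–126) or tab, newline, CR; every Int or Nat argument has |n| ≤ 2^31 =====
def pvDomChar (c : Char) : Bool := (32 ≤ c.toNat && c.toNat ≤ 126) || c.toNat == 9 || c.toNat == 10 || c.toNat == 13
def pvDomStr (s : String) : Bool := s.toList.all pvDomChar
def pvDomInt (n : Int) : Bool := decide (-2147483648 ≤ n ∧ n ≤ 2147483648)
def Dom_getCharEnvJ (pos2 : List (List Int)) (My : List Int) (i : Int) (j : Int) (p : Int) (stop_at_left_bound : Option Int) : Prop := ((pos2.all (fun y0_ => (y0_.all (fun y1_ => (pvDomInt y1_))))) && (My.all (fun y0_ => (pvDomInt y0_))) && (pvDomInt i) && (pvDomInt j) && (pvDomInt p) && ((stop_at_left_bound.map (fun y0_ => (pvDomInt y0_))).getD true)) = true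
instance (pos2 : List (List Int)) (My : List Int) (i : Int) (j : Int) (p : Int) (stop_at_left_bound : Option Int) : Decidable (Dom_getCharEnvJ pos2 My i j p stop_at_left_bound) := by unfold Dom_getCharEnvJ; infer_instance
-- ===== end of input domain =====

-- B replaces A's interleaved nested sweep + DELAYED bookkeeping by three staged passes:
-- boundary scans that delimit the visited row block, one flat collection pass over that
-- range, and a single walk over the sorted values (alternative decomposition, same cost).

-- ===== PORT A =====
-- the row condition A writes twice: My[k] < len(pos2[k]) and pos2[k][-1] >= i and pos2[k][My[k]] <= j
def aCond (pos2 : List (List Int)) (My : List Int) (i j r : Int) : Bool :=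
  let row := PySem.List.pyGetD pos2 r []
  let m := PySem.List.pyGetD My r 0
  decide (m < PySem.List.len row) && decide (i ≤ PySem.List.pyGetD row (-1) 0) &&
    decide (PySem.List.pyGetD row m 0 ≤ j)

-- inner x-scan: while x < len(row) and row[x] <= j: if row[x] > cj: DELAYED.add(row[x]); x += 1
def aScanX (row : List Int) (j cj : Int) (x : Int) (D : PySem.Set Int) : PySem.Set Int :=
  if h : x < PySem.List.len row ∧ PySem.List.pyGetD row x 0 ≤ j then
    aScanX row j cj (x + 1)
      (if cj < PySem.List.pyGetD row x 0 then PySem.Set.add D (PySem.List.pyGetD row x 0) else D)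
  else D
termination_by (PySem.List.len row - x).toNat
decreasing_by
  have := h.1; simp only [PySem.List.len_eq] at *; omega

-- while cj + 1 in DELAYED: DELAYED.remove(cj+1); cj += 1
def aDrain (cj : Int) (D : PySem.Set Int) : Int × PySem.Set Int :=
  if h : (cj + 1) ∈ D then
    aDrain (cj + 1) ((PySem.Set.remove? D (cj + 1)).getD D)
  else (cj, D)
termination_by D.length
decreasing_by
  rw [PySem.Set.remove?_of_mem h]
  simp only [Option.getD_some, PySem.Set.discard]
  exact List.length_filter_lt_length_iff_exists.mpr ⟨cj + 1, h, by simp⟩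

-- inner l-loop
def aLLoop (pos2 : List (List Int)) (My : List Int) (i j : Int) (l cj : Int)
    (D : PySem.Set Int) : Int × Int × PySem.Set Int :=
  if h : l < PySem.List.len pos2 ∧ aCond pos2 My i j l = true then
    let D1 := aScanX (PySem.List.pyGetD pos2 l []) j cj (PySem.List.pyGetD My l 0) D
    let r := aDrain cj D1
    aLLoop pos2 My i j (l + 1) r.1 r.2
  else (l, cj, D)
termination_by (PySem.List.len pos2 - l).toNat
decreasing_by
  have := h.1; simp only [PySem.List.len_eq] at *; omega

-- outer k-loop
def aKLoop (pos2 : List (List Int)) (My : List Int) (i j lb : Int) (k l cj : Int)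
    (D : PySem.Set Int) : Int :=
  if h : lb ≤ k ∧ aCond pos2 My i j k = true then
    let D1 := aScanX (PySem.List.pyGetD pos2 k []) j cj (PySem.List.pyGetD My k 0) D
    let r := aDrain cj D1
    let s := aLLoop pos2 My i j l r.1 r.2
    aKLoop pos2 My i j lb (k - 1) s.1 s.2.1 s.2.2
  else cj
termination_by (k - lb + 1).toNat
decreasing_by
  have := h.1; omega

def getCharEnvJ (pos2 : List (List Int)) (My : List Int) (i : Int) (j : Int) (p : Int)
    (stop_at_left_bound : Option Int) : Int :=
  let left_bound := max (stop_at_left_bound.getD 0) 0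
  aKLoop pos2 My i j left_bound p (p + 1) (i - 1) PySem.Set.empty

-- ===== PORT B =====
-- def admits(r): My[r] < len(pos2[r]) and pos2[r][-1] >= i and pos2[r][My[r]] <= j
def bAdmits (pos2 : List (List Int)) (My : List Int) (i j r : Int) : Bool :=
  let row := PySem.List.pyGetD pos2 r []
  let m := PySem.List.pyGetD My r 0
  decide (m < PySem.List.len row) && decide (i ≤ PySem.List.pyGetD row (-1) 0) &&
    decide (PySem.List.pyGetD row m 0 ≤ j)

-- lo = p; while lo >= lb and admits(lo): lo -= 1
def bLo (pos2 : List (List Int)) (My : List Int) (i j lb : Int) (lo : Int) : Int :=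
  if h : lb ≤ lo ∧ bAdmits pos2 My i j lo = true then bLo pos2 My i j lb (lo - 1) else lo
termination_by (lo - lb + 1).toNat
decreasing_by
  have := h.1; omega

-- hi = p+1; while hi < len(pos2) and admits(hi): hi += 1
def bHi (pos2 : List (List Int)) (My : List Int) (i j : Int) (hi : Int) : Int :=
  if h : hi < PySem.List.len pos2 ∧ bAdmits pos2 My i j hi = true then bHi pos2 My i j (hi + 1)
  else hi
termination_by (PySem.List.len pos2 - hi).toNat
decreasing_by
  have := h.1; simp only [PySem.List.len_eq] at *; omega

-- x = My[r]; while x < len(row) and row[x] <= j: vals.add(row[x]); x += 1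
def bScanRow (row : List Int) (j : Int) (x : Int) (S : PySem.Set Int) : PySem.Set Int :=
  if h : x < PySem.List.len row ∧ PySem.List.pyGetD row x 0 ≤ j then
    bScanRow row j (x + 1) (PySem.Set.add S (PySem.List.pyGetD row x 0))
  else S
termination_by (PySem.List.len row - x).toNat
decreasing_by
  have := h.1; simp only [PySem.List.len_eq] at *; omega

-- for r in range(lo+1, hi): <scan row r>
def bCollect (pos2 : List (List Int)) (My : List Int) (j : Int) (rows : List Int)
    (S : PySem.Set Int) : PySem.Set Int :=
  rows.foldl (fun S r => bScanRow (PySem.List.pyGetD pos2 r []) j (PySem.List.pyGetD My r 0) S) S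

-- cj = i-1; for v in sorted(vals): if v == cj+1: cj += 1 elif v > cj+1: break
def bWalk (vs : List Int) (cj : Int) : Int :=
  match vs with
  | [] => cj
  | v :: rest => if v = cj + 1 then bWalk rest (cj + 1) else if cj + 1 < v then cj else bWalk rest cj

def getCharEnvJ_alt (pos2 : List (List Int)) (My : List Int) (i : Int) (j : Int) (p : Int)
    (stop_at_left_bound : Option Int) : Int :=
  let lb := max (stop_at_left_bound.getD 0) 0
  let lo := bLo pos2 My i j lb p
  let hi := if lo < p then bHi pos2 My i j (p + 1) else p + 1
  let vals := bCollect pos2 My j (PySem.List.pyRange (lo + 1) hi 1) PySem.Set.empty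
  bWalk (PySem.List.sorted vals (fun v => v) false) (i - 1)

-- ===== PRECONDITION & SPEC =====
-- closed-form pieces of Pre_: a row the sweep looks at must be index-safe / pass the condition
def preRowSafe (pos2 : List (List Int)) (My : List Int) (i : Int) (r : Nat) : Bool :=
  !(decide (My.getD r 0 < ((pos2.getD r []).length : Int))) ||
    (!(pos2.getD r []).isEmpty &&
      (!(decide (i ≤ (pos2.getD r []).getLastD 0)) ||
        decide (-(((pos2.getD r []).length : Int)) ≤ My.getD r 0)))
def preEvL (pos2 : List (List Int)) (My : List Int) (i : Int) (r : Nat) : Bool :=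
  decide (r < My.length) && preRowSafe pos2 My i r
def preEv (pos2 : List (List Int)) (My : List Int) (i : Int) (r : Nat) : Bool :=
  decide (r < pos2.length) && preEvL pos2 My i r
def preCT (pos2 : List (List Int)) (My : List Int) (i j : Int) (r : Nat) : Bool :=
  decide (My.getD r 0 < ((pos2.getD r []).length : Int)) &&
    decide (i ≤ (pos2.getD r []).getLastD 0) &&
    decide (PySem.List.pyGetD (pos2.getD r []) (My.getD r 0) 0 ≤ j)

-- Pre_ excludes exactly the inputs on which the Python A raises IndexError: some row the
-- sweep actually reaches (every row strictly between it and p is in-bounds and passes the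
-- continue condition) has an out-of-range index — row index beyond len(My)/len(pos2), an
-- empty row probed at [-1], or a My entry below -len(row).  On every input where A returns
-- a value, Pre_ holds.
def Pre_getCharEnvJ (pos2 : List (List Int)) (My : List Int) (i : Int) (j : Int) (p : Int)
    (stop_at_left_bound : Option Int) : Prop :=
  (!(decide (max (stop_at_left_bound.getD 0) 0 ≤ p)) ||
   (preEv pos2 My i p.toNat &&
    ((List.range (p + 1).toNat).all (fun r =>
       !(decide (max (stop_at_left_bound.getD 0) 0 ≤ (r : Int))) ||
       !((List.range (p + 1).toNat).all (fun r' =>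
           !(decide (r < r')) || (preEv pos2 My i r' && preCT pos2 My i j r'))) ||
       preEv pos2 My i r)) &&
    (!(preCT pos2 My i j p.toNat) ||
     ((List.range pos2.length).all (fun r =>
       !(decide (p < (r : Int))) ||
       !((List.range r).all (fun r' =>
           !(decide (p < (r' : Int))) || preCT pos2 My i j r')) ||
       preEvL pos2 My i r))))) = true
instance (pos2 : List (List Int)) (My : List Int) (i : Int) (j : Int) (p : Int) (stop_at_left_bound : Option Int) : Decidable (Pre_getCharEnvJ pos2 My i j p stop_at_left_bound) := by unfold Pre_getCharEnvJ; infer_instance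

def pvWitness_getCharEnvJ : List (List Int) × List Int × Int × Int × Int × Option Int :=
  ([[1, 2], [3]], [0, 0], 1, 3, 0, none)

def Spec_getCharEnvJ (pos2 : List (List Int)) (My : List Int) (i : Int) (j : Int) (p : Int) (stop_at_left_bound : Option Int) (out : Int) : Prop := out = getCharEnvJ_alt pos2 My i j p stop_at_left_bound
instance (pos2 : List (List Int)) (My : List Int) (i : Int) (j : Int) (p : Int) (stop_at_left_bound : Option Int) (out : Int) : Decidable (Spec_getCharEnvJ pos2 My i j p stop_at_left_bound out) := by unfold Spec_getCharEnvJ; infer_instance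

-- ===== CLAIM (what is proved, stated in full; the proofs are below) =====
def Claim_equal_getCharEnvJ : Prop := ∀ (pos2 : List (List Int)) (My : List Int) (i : Int) (j : Int) (p : Int) (stop_at_left_bound : Option Int), Dom_getCharEnvJ pos2 My i j p stop_at_left_bound → Pre_getCharEnvJ pos2 My i j p stop_at_left_bound → Spec_getCharEnvJ pos2 My i j p stop_at_left_bound (getCharEnvJ pos2 My i j p stop_at_left_bound)

-- ===== LEMMAS AND PROOFS =====

theorem cond_eq (pos2 : List (List Int)) (My : List Int) (i j r : Int) :
    bAdmits pos2 My i j r = aCond pos2 My i j r := rfl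

-- the joint loop invariant: cj at least i-1, everything in i..cj already collected,
-- A's DELAYED is exactly the collected values above cj, and cj+1 not yet collected
def StInv (i cj : Int) (D S : PySem.Set Int) : Prop :=
  i - 1 ≤ cj ∧ (∀ v : Int, i ≤ v → v ≤ cj → v ∈ S) ∧
    (∀ v : Int, v ∈ D ↔ v ∈ S ∧ cj < v) ∧ (cj + 1) ∉ S

theorem scan_pair (row : List Int) (j cj : Int) :
    ∀ (x : Int) (D : PySem.Set Int) (S : PySem.Set Int),
    (∀ v : Int, v ∈ D ↔ v ∈ S ∧ cj < v) →
    (∀ v : Int, v ∈ aScanX row j cj x D ↔ v ∈ bScanRow row j x S ∧ cj < v) ∧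
    (∀ v : Int, v ∈ S → v ∈ bScanRow row j x S) := by
  intro x D
  induction x, D using aScanX.induct row j cj with
  | case1 x D h ih =>
    intro S hDS
    rw [aScanX, bScanRow, dif_pos h, dif_pos h]
    set w := PySem.List.pyGetD row x 0 with hw
    have hDS' : ∀ v : Int, v ∈ (if cj < w then PySem.Set.add D w else D) ↔
        v ∈ PySem.Set.add S w ∧ cj < v := by
      intro v
      by_cases hcw : cj < w
      · rw [if_pos hcw]
        constructor
        · intro hv
          rcases (PySem.Set.mem_add D w v).mp hv with hv' | hveq
          · exact ⟨(PySem.Set.mem_add S w v).mpr (Or.inl ((hDS v).mp hv').1), ((hDS v).mp hv').2⟩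
          · exact ⟨(PySem.Set.mem_add S w v).mpr (Or.inr hveq), by omega⟩
        · rintro ⟨hv, hcv⟩
          rcases (PySem.Set.mem_add S w v).mp hv with hv' | hveq
          · exact (PySem.Set.mem_add D w v).mpr (Or.inl ((hDS v).mpr ⟨hv', hcv⟩))
          · exact (PySem.Set.mem_add D w v).mpr (Or.inr hveq)
      · rw [if_neg hcw]
        constructor
        · intro hv
          exact ⟨(PySem.Set.mem_add S w v).mpr (Or.inl ((hDS v).mp hv).1), ((hDS v).mp hv).2⟩
        · rintro ⟨hv, hcv⟩
          rcases (PySem.Set.mem_add S w v).mp hv with hv' | hveq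
          · exact (hDS v).mpr ⟨hv', hcv⟩
          · exact absurd (show cj < w by omega) hcw
    obtain ⟨c1, c2⟩ := ih (PySem.Set.add S w) (by simpa only [dite_eq_ite] using hDS')
    refine ⟨by simpa only [dite_eq_ite] using c1, ?_⟩
    intro v hv
    exact c2 v ((PySem.Set.mem_add S w v).mpr (Or.inl hv))
  | case2 x D h =>
    intro S hDS
    rw [aScanX, bScanRow, dif_neg h, dif_neg h]
    exact ⟨hDS, fun v hv => hv⟩

theorem drain_spec (S : PySem.Set Int) :
    ∀ (cj : Int) (D : PySem.Set Int),
    (∀ v : Int, v ∈ D ↔ v ∈ S ∧ cj < v) →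
    cj ≤ (aDrain cj D).1 ∧
    (∀ v : Int, cj < v → v ≤ (aDrain cj D).1 → v ∈ S) ∧
    (∀ v : Int, v ∈ (aDrain cj D).2 ↔ v ∈ S ∧ (aDrain cj D).1 < v) ∧
    ((aDrain cj D).1 + 1) ∉ S := by
  intro cj D
  induction cj, D using aDrain.induct with
  | case1 cj D h ih =>
    intro hDS
    have hmem : cj + 1 ∈ S := ((hDS (cj + 1)).mp h).1
    have hD' : ∀ v : Int, v ∈ (PySem.Set.remove? D (cj + 1)).getD D ↔ v ∈ S ∧ cj + 1 < v := by
      intro v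
      rw [PySem.Set.remove?_of_mem h, Option.getD_some, PySem.Set.mem_discard]
      constructor
      · rintro ⟨hv, hne⟩
        have := (hDS v).mp hv
        exact ⟨this.1, by omega⟩
      · rintro ⟨hv, hlt⟩
        exact ⟨(hDS v).mpr ⟨hv, by omega⟩, by omega⟩
    obtain ⟨ih1, ih2, ih3, ih4⟩ := ih hD'
    rw [aDrain, dif_pos h]
    refine ⟨by omega, ?_, ih3, ih4⟩
    intro v hv1 hv2
    by_cases hveq : v = cj + 1
    · subst hveq; exact hmem
    · exact ih2 v (by omega) hv2
  | case2 cj D h =>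
    intro hDS
    rw [aDrain, dif_neg h]
    refine ⟨le_refl cj, ?_, hDS, ?_⟩
    · intro v hv1 hv2
      have hv2' : v ≤ cj := hv2
      exact absurd (lt_of_lt_of_le hv1 hv2') (lt_irrefl cj)
    · intro hmem
      have hmem' : cj + 1 ∈ S := hmem
      exact h ((hDS (cj + 1)).mpr ⟨hmem', by omega⟩)

theorem row_step (i j cj : Int) (row : List Int) (m : Int) (D S : PySem.Set Int)
    (h : StInv i cj D S) :
    StInv i (aDrain cj (aScanX row j cj m D)).1 (aDrain cj (aScanX row j cj m D)).2
      (bScanRow row j m S) ∧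
    cj ≤ (aDrain cj (aScanX row j cj m D)).1 := by
  obtain ⟨h1, h2, h3, _⟩ := h
  obtain ⟨p1, p2⟩ := scan_pair row j cj m D S h3
  obtain ⟨d1, d2, d3, d4⟩ := drain_spec (bScanRow row j m S) cj (aScanX row j cj m D) p1
  refine ⟨⟨by omega, ?_, d3, d4⟩, d1⟩
  intro v hv1 hv2
  by_cases hvc : v ≤ cj
  · exact p2 v (h2 v hv1 hvc)
  · exact d2 v (by omega) hv2

-- membership helpers for B's staged passes
theorem mem_scan_empty_fuel (row : List Int) (j : Int) :
    ∀ (n : Nat) (x : Int), (PySem.List.len row - x).toNat ≤ n → ∀ (S : PySem.Set Int) (v : Int),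
    v ∈ bScanRow row j x S ↔ v ∈ S ∨ v ∈ bScanRow row j x PySem.Set.empty := by
  intro n
  induction n with
  | zero =>
    intro x hx S v
    have hcond : ¬ (x < PySem.List.len row ∧ PySem.List.pyGetD row x 0 ≤ j) := by
      simp only [PySem.List.len_eq] at hx ⊢
      omega
    rw [bScanRow, dif_neg hcond]
    conv_rhs => rw [bScanRow]
    rw [dif_neg hcond]
    simp [PySem.Set.empty]
  | succ m ih =>
    intro x hx S v
    by_cases h : x < PySem.List.len row ∧ PySem.List.pyGetD row x 0 ≤ j
    · have hm : (PySem.List.len row - (x + 1)).toNat ≤ m := by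
        have := h.1
        simp only [PySem.List.len_eq] at hx this ⊢
        omega
      rw [bScanRow, dif_pos h]
      conv_rhs => rw [bScanRow]
      rw [dif_pos h]
      have h1 := ih (x + 1) hm (PySem.Set.add S (PySem.List.pyGetD row x 0)) v
      have h2 := ih (x + 1) hm (PySem.Set.add PySem.Set.empty (PySem.List.pyGetD row x 0)) v
      rw [h1, h2, PySem.Set.mem_add, PySem.Set.mem_add]
      simp only [PySem.Set.empty, List.not_mem_nil, false_or]
      tauto
    · rw [bScanRow, dif_neg h]
      conv_rhs => rw [bScanRow]
      rw [dif_neg h]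
      simp [PySem.Set.empty]

theorem mem_scan_empty (row : List Int) (j : Int) (x : Int) (S : PySem.Set Int) (v : Int) :
    v ∈ bScanRow row j x S ↔ v ∈ S ∨ v ∈ bScanRow row j x PySem.Set.empty :=
  mem_scan_empty_fuel row j (PySem.List.len row - x).toNat x (le_refl _) S v

def rowHas (pos2 : List (List Int)) (My : List Int) (j : Int) (r v : Int) : Prop :=
  v ∈ bScanRow (PySem.List.pyGetD pos2 r []) j (PySem.List.pyGetD My r 0) PySem.Set.empty

theorem mem_collect (pos2 : List (List Int)) (My : List Int) (j : Int) :
    ∀ (rows : List Int) (S : PySem.Set Int) (v : Int),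
    v ∈ bCollect pos2 My j rows S ↔ v ∈ S ∨ ∃ r ∈ rows, rowHas pos2 My j r v := by
  intro rows
  induction rows with
  | nil => intro S v; simp [bCollect]
  | cons r rest ih =>
    intro S v
    simp only [bCollect, List.foldl_cons] at *
    rw [ih, mem_scan_empty]
    simp only [List.mem_cons]
    constructor
    · rintro ((hS | hr) | ⟨r', hr', hh⟩)
      · exact Or.inl hS
      · exact Or.inr ⟨r, Or.inl rfl, hr⟩
      · exact Or.inr ⟨r', Or.inr hr', hh⟩
    · rintro (hS | ⟨r', (rfl | hr'), hh⟩)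
      · exact Or.inl (Or.inl hS)
      · exact Or.inl (Or.inr hh)
      · exact Or.inr ⟨r', hr', hh⟩

theorem nodup_scan_fuel (row : List Int) (j : Int) :
    ∀ (n : Nat) (x : Int), (PySem.List.len row - x).toNat ≤ n →
    ∀ (S : PySem.Set Int), S.Nodup → (bScanRow row j x S).Nodup := by
  intro n
  induction n with
  | zero =>
    intro x hx S hS
    have hcond : ¬ (x < PySem.List.len row ∧ PySem.List.pyGetD row x 0 ≤ j) := by
      simp only [PySem.List.len_eq] at hx ⊢
      omega
    rw [bScanRow, dif_neg hcond]
    exact hS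
  | succ m ih =>
    intro x hx S hS
    by_cases h : x < PySem.List.len row ∧ PySem.List.pyGetD row x 0 ≤ j
    · have hm : (PySem.List.len row - (x + 1)).toNat ≤ m := by
        have := h.1
        simp only [PySem.List.len_eq] at hx this ⊢
        omega
      rw [bScanRow, dif_pos h]
      exact ih (x + 1) hm _ (PySem.Set.nodup_add _ _ hS)
    · rw [bScanRow, dif_neg h]
      exact hS

theorem nodup_scan (row : List Int) (j : Int) (x : Int) (S : PySem.Set Int)
    (hS : S.Nodup) : (bScanRow row j x S).Nodup :=
  nodup_scan_fuel row j (PySem.List.len row - x).toNat x (le_refl _) S hS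

theorem nodup_collect (pos2 : List (List Int)) (My : List Int) (j : Int) :
    ∀ (rows : List Int) (S : PySem.Set Int), S.Nodup → (bCollect pos2 My j rows S).Nodup := by
  intro rows
  induction rows with
  | nil => intro S hS; exact hS
  | cons r rest ih =>
    intro S hS
    simp only [bCollect, List.foldl_cons] at *
    exact ih _ (nodup_scan _ _ _ _ hS)

-- boundary-scan facts
theorem bLo_le (pos2 : List (List Int)) (My : List Int) (i j lb : Int) :
    ∀ (k : Int), bLo pos2 My i j lb k ≤ k := by
  intro k
  induction k using bLo.induct pos2 My i j lb with
  | case1 k h ih => rw [bLo, dif_pos h]; omega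
  | case2 k h => rw [bLo, dif_neg h]

theorem le_bHi (pos2 : List (List Int)) (My : List Int) (i j : Int) :
    ∀ (l : Int), l ≤ bHi pos2 My i j l := by
  intro l
  induction l using bHi.induct pos2 My i j with
  | case1 l h ih => rw [bHi, dif_pos h]; omega
  | case2 l h => rw [bHi, dif_neg h]

theorem bHi_fix (pos2 : List (List Int)) (My : List Int) (i j : Int) :
    ∀ (l : Int), bHi pos2 My i j (bHi pos2 My i j l) = bHi pos2 My i j l := by
  intro l
  induction l using bHi.induct pos2 My i j with
  | case1 l h ih =>
    have hstep : bHi pos2 My i j l = bHi pos2 My i j (l + 1) := by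
      rw [bHi, dif_pos h]
    rw [hstep]
    exact ih
  | case2 l h =>
    have hstep : bHi pos2 My i j l = l := by rw [bHi, dif_neg h]
    rw [hstep]
    exact hstep

-- the l-loop of A visits exactly the rows l .. bHi l - 1
theorem lloop_pair (pos2 : List (List Int)) (My : List Int) (i j : Int) :
    ∀ (l cj : Int) (D : PySem.Set Int) (S : PySem.Set Int), StInv i cj D S →
    (aLLoop pos2 My i j l cj D).1 = bHi pos2 My i j l ∧
    StInv i (aLLoop pos2 My i j l cj D).2.1 (aLLoop pos2 My i j l cj D).2.2
      (bCollect pos2 My j (PySem.List.pyRange l (bHi pos2 My i j l) 1) S) := by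
  intro l cj D
  induction l, cj, D using aLLoop.induct pos2 My i j with
  | case1 l cj D h D1 r ih =>
    intro S hinv
    have hb : (l < PySem.List.len pos2 ∧ bAdmits pos2 My i j l = true) := by
      rw [cond_eq]; exact h
    have hhi : bHi pos2 My i j l = bHi pos2 My i j (l + 1) := by
      rw [bHi, dif_pos hb]
    have hlt : l < bHi pos2 My i j (l + 1) := by
      have := le_bHi pos2 My i j (l + 1); omega
    rw [aLLoop]
    simp only [dif_pos h]
    obtain ⟨hst, _⟩ := row_step i j cj (PySem.List.pyGetD pos2 l [])
      (PySem.List.pyGetD My l 0) D S hinv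
    obtain ⟨e1, e2⟩ := ih _ hst
    rw [hhi, PySem.List.pyRange_one_cons hlt]
    exact ⟨e1, by simpa only [bCollect, List.foldl_cons] using e2⟩
  | case2 l cj D h =>
    intro S hinv
    have hb : ¬ (l < PySem.List.len pos2 ∧ bAdmits pos2 My i j l = true) := by
      rw [cond_eq]; exact h
    have hhi : bHi pos2 My i j l = l := by rw [bHi, dif_neg hb]
    rw [aLLoop, dif_neg h, hhi, PySem.List.pyRange_one_eq_nil (le_refl l)]
    exact ⟨rfl, hinv⟩

-- the characterization of A's k-loop result against B's row block
theorem kloop_pair (pos2 : List (List Int)) (My : List Int) (i j lb : Int) :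
    ∀ (k l cj : Int) (D : PySem.Set Int) (S : PySem.Set Int), StInv i cj D S →
    i - 1 ≤ aKLoop pos2 My i j lb k l cj D ∧
    (∀ v : Int, i ≤ v → v ≤ aKLoop pos2 My i j lb k l cj D →
      (v ∈ S ∨
        (∃ r ∈ PySem.List.pyRange (bLo pos2 My i j lb k + 1) (k + 1) 1, rowHas pos2 My j r v) ∨
        (bLo pos2 My i j lb k < k ∧
          ∃ r ∈ PySem.List.pyRange l (bHi pos2 My i j l) 1, rowHas pos2 My j r v))) ∧
    ¬ ((aKLoop pos2 My i j lb k l cj D + 1) ∈ S ∨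
        (∃ r ∈ PySem.List.pyRange (bLo pos2 My i j lb k + 1) (k + 1) 1,
          rowHas pos2 My j r (aKLoop pos2 My i j lb k l cj D + 1)) ∨
        (bLo pos2 My i j lb k < k ∧
          ∃ r ∈ PySem.List.pyRange l (bHi pos2 My i j l) 1,
            rowHas pos2 My j r (aKLoop pos2 My i j lb k l cj D + 1))) := by
  intro k l cj D
  induction k, l, cj, D using aKLoop.induct pos2 My i j lb with
  | case1 k l cj D h D1 r s ih =>
    intro S hinv
    have hb : (lb ≤ k ∧ bAdmits pos2 My i j k = true) := by
      rw [cond_eq]; exact h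
    have hlo : bLo pos2 My i j lb k = bLo pos2 My i j lb (k - 1) := by
      rw [bLo, dif_pos hb]
    have hlole : bLo pos2 My i j lb (k - 1) ≤ k - 1 := bLo_le pos2 My i j lb (k - 1)
    obtain ⟨hst, _⟩ := row_step i j cj (PySem.List.pyGetD pos2 k [])
      (PySem.List.pyGetD My k 0) D S hinv
    obtain ⟨e1, e2⟩ := lloop_pair pos2 My i j l
      (aDrain cj (aScanX (PySem.List.pyGetD pos2 k []) j cj (PySem.List.pyGetD My k 0) D)).1
      (aDrain cj (aScanX (PySem.List.pyGetD pos2 k []) j cj (PySem.List.pyGetD My k 0) D)).2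
      (bScanRow (PySem.List.pyGetD pos2 k []) j (PySem.List.pyGetD My k 0) S) hst
    rw [aKLoop]
    simp only [dif_pos h]
    rw [e1] at ih ⊢
    rw [hlo]
    obtain ⟨k1, k2, k3⟩ := ih _ e2
    -- membership translation: after state = before state ∪ row k ∪ l-block
    have hmm : ∀ v : Int,
        (v ∈ bCollect pos2 My j
            (PySem.List.pyRange l (bHi pos2 My i j l) 1)
            (bScanRow (PySem.List.pyGetD pos2 k []) j (PySem.List.pyGetD My k 0) S) ∨
          (∃ r ∈ PySem.List.pyRange (bLo pos2 My i j lb (k - 1) + 1) (k - 1 + 1) 1,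
            rowHas pos2 My j r v) ∨
          (bLo pos2 My i j lb (k - 1) < k - 1 ∧
            ∃ r ∈ PySem.List.pyRange (bHi pos2 My i j l)
                (bHi pos2 My i j (bHi pos2 My i j l)) 1, rowHas pos2 My j r v))
        ↔ (v ∈ S ∨
          (∃ r ∈ PySem.List.pyRange (bLo pos2 My i j lb (k - 1) + 1) (k + 1) 1,
            rowHas pos2 My j r v) ∨
          (bLo pos2 My i j lb (k - 1) < k ∧
            ∃ r ∈ PySem.List.pyRange l (bHi pos2 My i j l) 1, rowHas pos2 My j r v)) := by
      intro v
      rw [mem_collect, mem_scan_empty, bHi_fix,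
        PySem.List.pyRange_one_eq_nil (le_refl (bHi pos2 My i j l))]
      have hsplit : PySem.List.pyRange (bLo pos2 My i j lb (k - 1) + 1) (k + 1) 1
          = PySem.List.pyRange (bLo pos2 My i j lb (k - 1) + 1) k 1 ++ [k] := by
        have := PySem.List.pyRange_one_succ_right
          (a := bLo pos2 My i j lb (k - 1) + 1) (b := k) (by omega)
        simpa using this
      rw [hsplit]
      have hk1 : k - 1 + 1 = k := by ring
      rw [hk1]
      simp only [List.mem_append, List.mem_singleton, List.not_mem_nil, exists_false,
        and_false, or_false, false_and]
      constructor
      · rintro (((hS | hK) | ⟨r', hr', hh⟩) | ⟨r', hr', hh⟩)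
        · exact Or.inl hS
        · exact Or.inr (Or.inl ⟨k, Or.inr rfl, hK⟩)
        · exact Or.inr (Or.inr ⟨by omega, r', hr', hh⟩)
        · exact Or.inr (Or.inl ⟨r', Or.inl hr', hh⟩)
      · rintro (hS | ⟨r', (hr' | rfl), hh⟩ | ⟨_, r', hr', hh⟩)
        · exact Or.inl (Or.inl (Or.inl hS))
        · exact Or.inr ⟨r', hr', hh⟩
        · exact Or.inl (Or.inl (Or.inr hh))
        · exact Or.inl (Or.inr ⟨r', hr', hh⟩)
    refine ⟨k1, ?_, ?_⟩
    · intro v hv1 hv2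
      exact (hmm v).mp (k2 v hv1 hv2)
    · intro hcon
      exact k3 ((hmm _).mpr hcon)
  | case2 k l cj D h =>
    intro S hinv
    have hb : ¬ (lb ≤ k ∧ bAdmits pos2 My i j k = true) := by
      rw [cond_eq]; exact h
    have hlo : bLo pos2 My i j lb k = k := by rw [bLo, dif_neg hb]
    rw [aKLoop, dif_neg h, hlo, PySem.List.pyRange_one_eq_nil (by omega)]
    obtain ⟨h1, h2, _, h4⟩ := hinv
    refine ⟨h1, ?_, ?_⟩
    · intro v hv1 hv2
      exact Or.inl (h2 v hv1 hv2)
    · rintro (hS | ⟨r, hr, _⟩ | ⟨hlt, _⟩)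
      · exact h4 hS
      · exact absurd hr (List.not_mem_nil)
      · omega

-- the final walk over a strictly increasing list computes the greedy extension
theorem walk_char (vs : List Int) (hvs : vs.Pairwise (· < ·)) :
    ∀ (c : Int), c ≤ bWalk vs c ∧
      (∀ v : Int, c < v → v ≤ bWalk vs c → v ∈ vs) ∧ (bWalk vs c + 1) ∉ vs := by
  induction vs with
  | nil =>
    intro c
    exact ⟨le_refl c, fun v hv1 hv2 => absurd (lt_of_lt_of_le hv1 hv2) (lt_irrefl c),
      List.not_mem_nil⟩
  | cons v rest ih =>
    have hv_rest : ∀ u ∈ rest, v < u := (List.pairwise_cons.mp hvs).1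
    have hrest := ih (List.pairwise_cons.mp hvs).2
    intro c
    show c ≤ bWalk (v :: rest) c ∧ _
    rw [bWalk]
    by_cases h1 : v = c + 1
    · rw [if_pos h1]
      obtain ⟨r1, r2, r3⟩ := hrest (c + 1)
      refine ⟨by omega, ?_, ?_⟩
      · intro u hu1 hu2
        by_cases hue : u = c + 1
        · exact List.mem_cons.mpr (Or.inl (by omega))
        · exact List.mem_cons_of_mem v (r2 u (by omega) hu2)
      · intro hmem
        rcases List.mem_cons.mp hmem with he | hm
        · omega
        · exact r3 hm
    · rw [if_neg h1]
      by_cases h2 : c + 1 < v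
      · rw [if_pos h2]
        refine ⟨le_refl c, ?_, ?_⟩
        · intro u hu1 hu2
          exact absurd (lt_of_lt_of_le hu1 hu2) (lt_irrefl c)
        · intro hmem
          rcases List.mem_cons.mp hmem with he | hm
          · omega
          · have := hv_rest _ hm; omega
      · rw [if_neg h2]
        obtain ⟨r1, r2, r3⟩ := hrest c
        have hvc : v ≤ c := by omega
        refine ⟨r1, ?_, ?_⟩
        · intro u hu1 hu2
          exact List.mem_cons_of_mem v (r2 u hu1 hu2)
        · intro hmem
          rcases List.mem_cons.mp hmem with he | hm
          · omega
          · exact r3 hm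

-- two greedy extensions over the same membership predicate agree
theorem ext_unique (c : Int) (P : Int → Prop) (w1 w2 : Int)
    (h1 : c ≤ w1) (h2 : ∀ v, c < v → v ≤ w1 → P v) (h3 : ¬ P (w1 + 1))
    (h4 : c ≤ w2) (h5 : ∀ v, c < v → v ≤ w2 → P v) (h6 : ¬ P (w2 + 1)) : w1 = w2 := by
  by_contra hne
  rcases lt_trichotomy w1 w2 with hlt | heq | hgt
  · exact h3 (h5 (w1 + 1) (by omega) (by omega))
  · exact hne heq
  · exact h6 (h2 (w2 + 1) (by omega) (by omega))

-- ===== VERDICT (by name: the statement is the Claim_ definition above) =====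
theorem getCharEnvJ_spec : Claim_equal_getCharEnvJ := by
  intro pos2 My i j p slb _ _
  unfold Spec_getCharEnvJ getCharEnvJ getCharEnvJ_alt
  set lb := max (slb.getD 0) 0 with hlb
  set lo := bLo pos2 My i j lb p with hlo
  set hi := (if lo < p then bHi pos2 My i j (p + 1) else p + 1) with hhi
  set vals := bCollect pos2 My j (PySem.List.pyRange (lo + 1) hi 1) PySem.Set.empty with hvals
  have hinv : StInv i (i - 1) PySem.Set.empty PySem.Set.empty := by
    refine ⟨le_refl _, ?_, by simp [PySem.Set.empty], by simp [PySem.Set.empty]⟩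
    intro v hv1 hv2
    exact absurd (le_trans hv1 hv2) (by omega)
  obtain ⟨k1, k2, k3⟩ := kloop_pair pos2 My i j lb p (p + 1) (i - 1)
    PySem.Set.empty PySem.Set.empty hinv
  -- the collected set of B holds exactly the values A's sweep can see
  have hvmem : ∀ v : Int, v ∈ vals ↔
      ((∃ r ∈ PySem.List.pyRange (lo + 1) (p + 1) 1, rowHas pos2 My j r v) ∨
        (lo < p ∧ ∃ r ∈ PySem.List.pyRange (p + 1) (bHi pos2 My i j (p + 1)) 1,
          rowHas pos2 My j r v)) := by
    intro v
    rw [hvals, mem_collect]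
    simp only [PySem.Set.empty, List.not_mem_nil, false_or]
    by_cases hcase : lo < p
    · rw [hhi, if_pos hcase]
      have hple : (p + 1) ≤ bHi pos2 My i j (p + 1) := le_bHi pos2 My i j (p + 1)
      rw [PySem.List.pyRange_one_append (lo + 1) (p + 1) (bHi pos2 My i j (p + 1))
        (by omega) hple]
      simp only [List.mem_append]
      constructor
      · rintro ⟨r, (hr | hr), hh⟩
        · exact Or.inl ⟨r, hr, hh⟩
        · exact Or.inr ⟨hcase, r, hr, hh⟩
      · rintro (⟨r, hr, hh⟩ | ⟨_, r, hr, hh⟩)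
        · exact ⟨r, Or.inl hr, hh⟩
        · exact ⟨r, Or.inr hr, hh⟩
    · have hple : p ≤ lo := by omega
      have hlop : lo = p := le_antisymm (bLo_le pos2 My i j lb p) hple
      rw [hhi, if_neg hcase, hlop]
      rw [PySem.List.pyRange_one_eq_nil (le_refl (p + 1))]
      simp
  -- sorted vals is strictly increasing with the same members
  have hnd : vals.Nodup := nodup_collect pos2 My j _ _ (List.nodup_nil)
  have hsorted_nd : (PySem.List.sorted vals (fun v => v) false).Nodup :=
    ((PySem.List.sorted_perm vals (fun v => v) false).nodup_iff).mpr hnd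
  have hpw : (PySem.List.sorted vals (fun v => v) false).Pairwise (· < ·) := by
    have hle := PySem.List.sorted_pairwise (xs := vals) (key := fun v => v)
    exact (hle.and hsorted_nd).imp (fun hab => lt_of_le_of_ne hab.1 hab.2)
  obtain ⟨w1, w2, w3⟩ := walk_char (PySem.List.sorted vals (fun v => v) false) hpw (i - 1)
  have hmem_sorted : ∀ v : Int, v ∈ PySem.List.sorted vals (fun v => v) false ↔ v ∈ vals :=
    fun v => PySem.List.mem_sorted vals (fun v => v) false v
  -- both sides are the greedy extension of i-1 through the same membership predicate
  apply ext_unique (i - 1) (fun v => v ∈ vals)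
    (h1 := k1)
    (h2 := ?_) (h3 := ?_) (h4 := w1)
    (h5 := ?_) (h6 := ?_)
  · intro v hv1 hv2
    have := k2 v (by omega) hv2
    rcases this with hS | hrest
    · exact absurd hS (List.not_mem_nil)
    · exact (hvmem v).mpr (by simpa [hlo] using hrest)
  · intro hmem
    apply k3
    exact Or.inr (by simpa [hlo] using (hvmem _).mp hmem)
  · intro v hv1 hv2
    exact (hmem_sorted v).mp (w2 v hv1 hv2)
  · intro hmem
    exact w3 ((hmem_sorted _).mpr hmem)
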